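-- pv_equiv track=rewrite | github.com/Lokeshyadav2398/lokeshdev | suresh/dhcp_bysir/final_project.py | entry_position
-- ===== SOURCE A (Python) =====
-- def entry_position(data):
--     tlist=[]
--     str_host = "host"
--     end_of_entry = "}"
--     for i,line in enumerate(data):
--         if line.startswith(str_host):
--             spos = i+1
--
--         if end_of_entry in line:
--             epos = i+1
--             tlist.append((spos, epos))
--
--     return tlist
-- ===== SOURCE B (Python) =====
-- def _host_indices(data):
--     return [i for i, line in enumerate(data) if line.startswith("host")]
--
--
-- def entry_position(data):
--     hosts = _host_indices(data)
--     return [(max(h for h in hosts if h <= i) + 1, i + 1)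
--             for i, line in enumerate(data) if "}" in line]
-- ===== Notes on version B (the rewrite author's own statement) =====
-- stated objective: alternative
-- what changed: Replaces A's single stateful pass carrying the last-seen host position with a two-phase decomposition: first build the list of host-line indices, then map over the end lines, pairing each with the maximum host index at or before it.
import Mathlib
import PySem

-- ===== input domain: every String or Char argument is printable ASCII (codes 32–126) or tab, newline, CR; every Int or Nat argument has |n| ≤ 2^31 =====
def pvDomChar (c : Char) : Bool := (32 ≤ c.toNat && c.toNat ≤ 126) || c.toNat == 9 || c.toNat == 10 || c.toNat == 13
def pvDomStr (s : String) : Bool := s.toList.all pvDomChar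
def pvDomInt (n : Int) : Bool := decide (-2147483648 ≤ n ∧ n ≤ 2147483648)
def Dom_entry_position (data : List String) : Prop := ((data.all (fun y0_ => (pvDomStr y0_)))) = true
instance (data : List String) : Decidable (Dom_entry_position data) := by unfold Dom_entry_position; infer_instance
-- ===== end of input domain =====

-- B replaces A's single stateful pass (carrying the last-seen host position) by a two-phase
-- decomposition: build the list of host-line indices first, then map over the end lines,
-- pairing each with the maximum host index at or before it (objective: alternative).

-- ===== PORT A =====
-- one loop step of A: update spos on a "host" line, then append (spos, i+1) on a "}" line.
-- spos is an Option: 'none' is Python's unbound spos (there A raises NameError; Pre_ excludes that).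
def entryStepA (st : Option Int × List (Int × Int)) (p : Int × String) : Option Int × List (Int × Int) :=
  let st1 := if PySem.Str.startswith p.2 "host" then (some (p.1 + 1), st.2) else st
  if PySem.Str.isIn "}" p.2 then
    match st1.1 with
    | some s => (st1.1, st1.2 ++ [(s, p.1 + 1)])
    | none => st1
  else st1

def entry_position (data : List String) : List (Int × Int) :=
  ((PySem.List.enumerate data 0).foldl entryStepA (none, [])).2

-- ===== PORT B =====
-- helper _host_indices of Source B
def hostIdx (data : List String) : List Int :=
  ((PySem.List.enumerate data 0).filter (fun p => PySem.Str.startswith p.2 "host")).map (·.1)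

def entry_position_alt (data : List String) : List (Int × Int) :=
  let hosts := hostIdx data
  ((PySem.List.enumerate data 0).filter (fun p => PySem.Str.isIn "}" p.2)).map
    (fun p => ((PySem.List.max? (hosts.filter (fun h => h ≤ p.1)) (fun h => h)).getD (-1) + 1, p.1 + 1))

-- ===== PRECONDITION & SPEC =====
-- Pre_ excludes exactly the inputs on which A raises NameError (a "}" line with no line starting
-- with "host" at or before it); B raises ValueError (max of an empty sequence) there too.
def Pre_entry_position (data : List String) : Prop :=
  ∀ p ∈ PySem.List.enumerate data 0, PySem.Str.isIn "}" p.2 = true →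
    ∃ q ∈ PySem.List.enumerate data 0, q.1 ≤ p.1 ∧ PySem.Str.startswith q.2 "host" = true

instance (data : List String) : Decidable (Pre_entry_position data) := by
  unfold Pre_entry_position; infer_instance

def pvWitness_entry_position : List String := ["host a {", "}", "host b {", "x", "}"]

def Spec_entry_position (data : List String) (out : List (Int × Int)) : Prop := out = entry_position_alt data
instance (data : List String) (out : List (Int × Int)) : Decidable (Spec_entry_position data out) := by unfold Spec_entry_position; infer_instance

-- ===== CLAIM (what is proved, stated in full; the proofs are below) =====
def Claim_equal_entry_position : Prop := ∀ (data : List String), Dom_entry_position data → Pre_entry_position data → Spec_entry_position data (entry_position data)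

-- ===== LEMMAS AND PROOFS =====

theorem enumerate_single (x : String) (s : Int) :
    PySem.List.enumerate [x] s = [(s, x)] := by
  simp [PySem.List.enumerate_cons, PySem.List.enumerate_nil]

theorem hostIdx_mem_lt (data : List String) (h : Int) (hh : h ∈ hostIdx data) :
    0 ≤ h ∧ h < (data.length : Int) := by
  unfold hostIdx at hh
  obtain ⟨p, hp, rfl⟩ := List.mem_map.1 hh
  have hp' := List.mem_of_mem_filter hp
  obtain ⟨k, hk, rfl⟩ := (PySem.List.mem_enumerate_iff _ _ _).1 hp'
  simp
  omega

theorem hostIdx_pairwise (data : List String) : (hostIdx data).Pairwise (· < ·) := by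
  unfold hostIdx
  exact List.pairwise_map.2 ((PySem.List.pairwise_lt_enumerate _ _).filter _)

theorem foldl_max_chain (t : List Int) : ∀ x : Int, (x :: t).Pairwise (· < ·) →
    t.foldl max x = (x :: t).getLast (by simp) := by
  induction t with
  | nil => intro x _; simp
  | cons y t' ih =>
    intro x hp
    have hxy : x < y := (List.pairwise_cons.1 hp).1 y (by simp)
    have hp' : (y :: t').Pairwise (· < ·) := (List.pairwise_cons.1 hp).2
    have hm : max x y = y := max_eq_right hxy.le
    simp only [List.foldl_cons, hm]
    rw [ih y hp']
    simp [List.getLast_cons]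

theorem max?_eq_getLast? (l : List Int) (hp : l.Pairwise (· < ·)) :
    PySem.List.max? l (fun x => x) = l.getLast? := by
  cases l with
  | nil => simp [PySem.List.max?_eq_none_iff]
  | cons x t =>
    rw [PySem.List.max?_id_cons, foldl_max_chain t x hp]
    simp [List.getLast?_eq_some_getLast]

theorem hostIdx_append (ys : List String) (x : String) :
    hostIdx (ys ++ [x]) =
      hostIdx ys ++ (if PySem.Str.startswith x "host" then [((ys.length : Int))] else []) := by
  unfold hostIdx
  rw [PySem.List.enumerate_append, List.filter_append, List.map_append]
  congr 1
  rw [show (0 : Int) + ys.length = (ys.length : Int) by ring, enumerate_single]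
  cases h : PySem.Str.startswith x "host" <;> simp at h <;> simp [h]

theorem pre_prefix (ys : List String) (x : String)
    (h : Pre_entry_position (ys ++ [x])) : Pre_entry_position ys := by
  intro p hp hin
  have hp2 : p ∈ PySem.List.enumerate (ys ++ [x]) 0 := by
    rw [PySem.List.enumerate_append]; exact List.mem_append_left _ hp
  obtain ⟨q, hq, hle, hs⟩ := h p hp2 hin
  rw [PySem.List.enumerate_append] at hq
  rcases List.mem_append.1 hq with hq1 | hq2
  · exact ⟨q, hq1, hle, hs⟩
  · exfalso
    rw [show (0 : Int) + ys.length = (ys.length : Int) by ring, enumerate_single] at hq2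
    obtain ⟨k, hk, rfl⟩ := (PySem.List.mem_enumerate_iff _ _ _).1 hp
    simp at hq2
    have hq1' : q.1 = (ys.length : Int) := by rw [hq2]
    omega

-- B on ys ++ [x] is B on ys plus (possibly) one new end entry built from all hosts of ys ++ [x].
theorem alt_append (ys : List String) (x : String) :
    entry_position_alt (ys ++ [x]) =
      entry_position_alt ys ++
        (if PySem.Str.isIn "}" x then
          [((PySem.List.max? (hostIdx (ys ++ [x])) (fun h => h)).getD (-1) + 1, (ys.length : Int) + 1)]
         else []) := by
  unfold entry_position_alt
  rw [PySem.List.enumerate_append, List.filter_append, List.map_append]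
  congr 1
  · -- old end lines: the appended host index (if any) exceeds every old end index
    apply List.map_congr_left
    intro p hp
    have hp' := List.mem_of_mem_filter hp
    obtain ⟨k, hk, rfl⟩ := (PySem.List.mem_enumerate_iff _ _ _).1 hp'
    have hfil : (hostIdx (ys ++ [x])).filter (fun h => h ≤ ((0 : Int) + (k : Int), ys[k]).1) =
        (hostIdx ys).filter (fun h => h ≤ ((0 : Int) + (k : Int), ys[k]).1) := by
      rw [hostIdx_append, List.filter_append]
      have hnil : (if PySem.Str.startswith x "host" then [((ys.length : Int))] else []).filter
          (fun h => h ≤ ((0 : Int) + (k : Int), ys[k]).1) = [] := by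
        cases h : PySem.Str.startswith x "host" <;> simp at h
        · simp
        · simp
          omega
      rw [hnil, List.append_nil]
    rw [hfil]
  · -- the new line
    rw [show (0 : Int) + ys.length = (ys.length : Int) by ring, enumerate_single]
    have hall : (hostIdx (ys ++ [x])).filter (fun h => h ≤ ((ys.length : Int))) =
        hostIdx (ys ++ [x]) := by
      apply List.filter_eq_self.2
      intro a ha
      have hb := hostIdx_mem_lt (ys ++ [x]) a ha
      simp at hb ⊢
      omega
    cases h : PySem.Str.isIn "}" x <;> simp at h <;> simp [h, hall]

-- the combined loop invariant for A: after the whole fold, spos is the last host index + 1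
-- and the accumulated list is exactly B's output.
theorem mainInv (data : List String) (hpre : Pre_entry_position data) :
    (PySem.List.enumerate data 0).foldl entryStepA (none, []) =
      ((hostIdx data).getLast?.map (· + 1), entry_position_alt data) := by
  induction data using List.reverseRecOn with
  | nil =>
    simp [PySem.List.enumerate_nil, hostIdx, entry_position_alt]
  | append_singleton ys x ih =>
    have ihys := ih (pre_prefix ys x hpre)
    have hhi := hostIdx_append ys x
    rw [PySem.List.enumerate_append, List.foldl_append,
        show (0 : Int) + ys.length = (ys.length : Int) by ring, enumerate_single]
    simp only [List.foldl_cons, List.foldl_nil, ihys]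
    rw [alt_append]
    unfold entryStepA
    by_cases he : PySem.Str.isIn "}" x = true
    · by_cases hh : PySem.Str.startswith x "host" = true
      · -- x is a host line (and an end line): it pairs with itself
        simp only [hh, if_true] at hhi
        have hpw := hostIdx_pairwise (ys ++ [x])
        rw [hhi] at hpw
        rw [hhi, max?_eq_getLast? _ hpw]
        simp at hh he
        simp [hh, he]
      · -- x only ends a block: pairs with the last host of ys (Pre_ gives one exists)
        rw [if_neg hh, List.append_nil] at hhi
        have hq : ∃ q ∈ PySem.List.enumerate (ys ++ [x]) 0,
            q.1 ≤ ((ys.length : Int)) ∧ PySem.Str.startswith q.2 "host" = true := by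
          have hpmem : (((ys.length : Int)), x) ∈ PySem.List.enumerate (ys ++ [x]) 0 := by
            rw [PySem.List.enumerate_append,
                show (0 : Int) + ys.length = (ys.length : Int) by ring, enumerate_single]
            exact List.mem_append_right _ (by simp)
          exact hpre _ hpmem he
        obtain ⟨q, hqmem, _, hqs⟩ := hq
        have hqys : q ∈ PySem.List.enumerate ys 0 := by
          rw [PySem.List.enumerate_append,
              show (0 : Int) + ys.length = (ys.length : Int) by ring, enumerate_single] at hqmem
          rcases List.mem_append.1 hqmem with h1 | h2
          · exact h1
          · exfalso; simp at h2
            rw [h2] at hqs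
            exact hh hqs
        have hne : hostIdx ys ≠ [] := by
          intro hnil
          have : q.1 ∈ hostIdx ys :=
            List.mem_map.2 ⟨q, List.mem_filter.2 ⟨hqys, hqs⟩, rfl⟩
          rw [hnil] at this
          exact absurd this (List.not_mem_nil)
        obtain ⟨L, hL⟩ : ∃ L, (hostIdx ys).getLast? = some L := by
          cases hg : (hostIdx ys).getLast? with
          | none => exact absurd (List.getLast?_eq_none_iff.1 hg) hne
          | some L => exact ⟨L, rfl⟩
        have hpw := hostIdx_pairwise (ys ++ [x])
        rw [hhi] at hpw
        rw [hhi, max?_eq_getLast? _ hpw, hL]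
        simp at hh he
        simp [hh, he]
    · -- no "}" in x: nothing appended on either side
      rw [hhi]
      simp at he
      by_cases hh : PySem.Str.startswith x "host" = true <;> (simp at hh; simp [hh, he])

-- ===== VERDICT (by name: the statement is the Claim_ definition above) =====
theorem entry_position_spec : Claim_equal_entry_position := by
  intro data _ hpre
  unfold Spec_entry_position entry_position
  rw [mainInv data hpre]
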